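-- pv_equiv track=rewrite | github.com/lksnext-ai-lab/spec-kit-template | tools/close_iteration.py | _status_is_closed
-- ===== SOURCE A (Python) =====
-- from typing import Final, Iterable, NoReturn
--
-- CLOSED_STATUS_TOKENS: Final[set[str]] = {
--     "cerrada",
--     "cerrado",
--     "resuelta",
--     "resuelto",
--     "completada",
--     "completado",
--     "hecha",
--     "hecho",
--     "done",
--     "closed",
--     "resolved",
--     "complete",
--     "completed",
--     "ok",
-- }
--
-- def _status_is_closed(status: str) -> bool:
--     s = status.strip().lower()
--     if not s:
--         return False
--     # match por tokens
--     for tok in CLOSED_STATUS_TOKENS: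
--         if tok in s:
--             return True
--     return False
-- ===== SOURCE B (Python) =====
-- CLOSED_STATUS_TOKENS = frozenset(
--     "cerrada cerrado resuelta resuelto completada completado "
--     "hecha hecho done closed resolved complete completed ok".split()
-- )
--
-- _TOKEN_LENGTHS = sorted({len(t) for t in CLOSED_STATUS_TOKENS})
--
-- def _status_is_closed(status: str) -> bool:
--     s = status.strip().lower()
--     return any(
--         s[i:i + n] in CLOSED_STATUS_TOKENS
--         for i in range(len(s))
--         for n in _TOKEN_LENGTHS
--     )
-- ===== Notes on version B (the rewrite author's own statement) =====
-- stated objective: alternative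
-- what changed: Instead of running a separate substring scan of s for each of the 14 tokens, B scans positions of s once and tests each fixed-length slice for membership in a hash set of tokens, so the inner per-token search disappears.
import Mathlib
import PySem

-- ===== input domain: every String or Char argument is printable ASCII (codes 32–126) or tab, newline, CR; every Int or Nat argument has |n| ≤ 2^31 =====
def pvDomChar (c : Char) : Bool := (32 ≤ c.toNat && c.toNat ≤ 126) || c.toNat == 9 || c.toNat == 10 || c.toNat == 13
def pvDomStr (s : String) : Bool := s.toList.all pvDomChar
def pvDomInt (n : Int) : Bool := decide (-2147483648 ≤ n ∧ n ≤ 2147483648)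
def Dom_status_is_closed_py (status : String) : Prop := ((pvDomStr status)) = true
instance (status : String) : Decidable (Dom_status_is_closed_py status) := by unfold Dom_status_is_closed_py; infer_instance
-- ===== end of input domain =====

-- B replaces A's per-token substring scans with a single position loop testing fixed-length
-- slices against the token set (alternative decomposition; same cost class, return value only).


-- ===== PORT A =====
-- CLOSED_STATUS_TOKENS in source order (a Python set; A's loop result is order-independent)
def closedTokensA : List (List Char) :=
  ["cerrada".toList, "cerrado".toList, "resuelta".toList, "resuelto".toList,
   "completada".toList, "completado".toList, "hecha".toList, "hecho".toList,
   "done".toList, "closed".toList, "resolved".toList, "complete".toList,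
   "completed".toList, "ok".toList]

-- the 'for tok in CLOSED_STATUS_TOKENS: if tok in s: return True' loop
def loopA (toks : List (List Char)) (s : List Char) : Bool :=
  match toks with
  | [] => false
  | tok :: rest => if PySem.Chars.isIn tok s then true else loopA rest s

def status_is_closed_py (status : String) : Bool :=
  let s := PySem.Chars.lower (PySem.Chars.strip status.toList)
  if s.isEmpty then false
  else loopA closedTokensA s

-- ===== PORT B =====
-- frozenset("… ….split()")  — the space-separated literal, split, as Source B builds it
def tokensB : List (List Char) :=
  PySem.Chars.split₀
    ("cerrada cerrado resuelta resuelto completada completado " ++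
     "hecha hecho done closed resolved complete completed ok").toList

-- sorted({len(t) for t in CLOSED_STATUS_TOKENS})
def tokenLengthsB : List Nat := [2, 4, 5, 6, 7, 8, 9, 10]

def status_is_closed_py_alt (status : String) : Bool :=
  let s := PySem.Chars.lower (PySem.Chars.strip status.toList)
  (List.range s.length).any fun i =>
    tokenLengthsB.any fun n => tokensB.contains ((s.drop i).take n)

-- ===== PRECONDITION & SPEC =====
def Spec_status_is_closed_py (status : String) (out : Bool) : Prop := out = status_is_closed_py_alt status
instance (status : String) (out : Bool) : Decidable (Spec_status_is_closed_py status out) := by unfold Spec_status_is_closed_py; infer_instance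

-- ===== CLAIM (what is proved, stated in full; the proofs are below) =====
def Claim_equal_status_is_closed_py : Prop := ∀ (status : String), Dom_status_is_closed_py status → Spec_status_is_closed_py status (status_is_closed_py status)

-- ===== LEMMAS AND PROOFS =====

-- A's loop is an 'any' over the token list
theorem loopA_eq_any (toks : List (List Char)) (s : List Char) :
    loopA toks s = toks.any (fun t => PySem.Chars.isIn t s) := by
  induction toks with
  | nil => rfl
  | cons tok rest ih => rw [loopA, ih, List.any_cons]; split_ifs with h <;> simp [h]

-- Source B's split of the joined literal yields exactly A's tokens (same order even)
theorem tokensB_eq : tokensB = closedTokensA := by decide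

-- every token is nonempty and its length is listed in tokenLengthsB
theorem tokens_shape : ∀ t ∈ closedTokensA, t ≠ [] ∧ t.length ∈ tokenLengthsB := by decide

-- a fixed-length slice of s is an infix of s
theorem slice_infix (s : List Char) (i n : Nat) : (s.drop i).take n <:+: s :=
  ((s.drop i).take_prefix n).isInfix.trans (s.drop_suffix i).isInfix

-- a nonempty infix of s is a fixed-length slice at some position i < s.length
theorem infix_slice {t s : List Char} (hne : t ≠ []) (h : t <:+: s) :
    ∃ i < s.length, (s.drop i).take t.length = t := by
  obtain ⟨p, q, rfl⟩ := h
  refine ⟨p.length, ?_, ?_⟩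
  · have : 0 < t.length := List.length_pos_iff.mpr hne
    simp [List.length_append]; omega
  · rw [List.append_assoc, List.drop_left, List.take_left]

-- B's position-and-length scan finds a match iff some token is a substring of s
theorem scanB_eq_any (s : List Char) :
    ((List.range s.length).any fun i =>
        tokenLengthsB.any fun n => tokensB.contains ((s.drop i).take n)) =
      closedTokensA.any (fun t => PySem.Chars.isIn t s) := by
  rw [tokensB_eq, Bool.eq_iff_iff]
  simp only [List.any_eq_true, List.mem_range, List.contains_eq_mem, decide_eq_true_eq]
  constructor
  · rintro ⟨i, _, n, _, ht⟩
    exact ⟨_, ht, (PySem.Chars.isIn_iff_infix _ _).mpr (slice_infix s i n)⟩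
  · rintro ⟨t, htmem, hin⟩
    obtain ⟨hne, hlen⟩ := tokens_shape t htmem
    obtain ⟨i, hi, hslice⟩ := infix_slice hne ((PySem.Chars.isIn_iff_infix _ _).mp hin)
    exact ⟨i, hi, t.length, hlen, by rw [hslice]; exact htmem⟩

-- ===== VERDICT (by name: the statement is the Claim_ definition above) =====
theorem status_is_closed_py_spec : Claim_equal_status_is_closed_py := by
  intro status _
  unfold Spec_status_is_closed_py status_is_closed_py status_is_closed_py_alt
  set s := PySem.Chars.lower (PySem.Chars.strip status.toList) with hs
  rw [scanB_eq_any]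
  by_cases h : s.isEmpty
  · rw [List.isEmpty_iff] at h
    simp [h]
    decide
  · simp [h, loopA_eq_any]
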